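-- pv_equiv track=rewrite | github.com/rzl56742-ui/mabilisss-queue | db.py | count_reserved_position
-- ===== SOURCE A (Python) =====
-- TERMINAL = ("COMPLETED", "CANCELLED", "VOID", "EXPIRED")
--
-- def count_reserved_position(queue_list, entry):
--     """Get this entry's position among RESERVED entries in its category (by issued_at).
--     Returns 1-based position. E.g., position 3 = two reservations were made earlier."""
--     cat_id = entry.get("category_id", "")
--     my_issued = entry.get("issued_at", "9999")
--     my_id = entry.get("id", "")
--
--     reserved = [e for e in queue_list
--                 if e.get("category_id") == cat_id
--                 and e.get("status") == "RESERVED"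
--                 and not e.get("bqms_number")
--                 and e.get("status") not in TERMINAL]
--     reserved.sort(key=lambda e: e.get("issued_at", "9999"))
--
--     for idx, e in enumerate(reserved):
--         if e.get("id") == my_id:
--             return idx + 1
--     return len(reserved) + 1
-- ===== SOURCE B (Python) =====
-- def count_reserved_position(queue_list, entry):
--     """Rank by counting the reservations ordered before mine instead of sorting."""
--     cat_id = entry.get("category_id", "")
--     my_id = entry.get("id", "")
--
--     keys = []            # issued_at keys of reserved entries, in original order
--     best = None          # (key, index) of the stable-sort-first entry with my id
--     for e in queue_list:
--         if (e.get("category_id") != cat_id or e.get("status") != "RESERVED"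
--                 or e.get("bqms_number")):
--             continue
--         k = e.get("issued_at", "9999")
--         i = len(keys)
--         keys.append(k)
--         if e.get("id") == my_id and (best is None or k < best[0]):
--             best = (k, i)
--
--     if best is None:
--         return len(keys) + 1
--     bk, bi = best
--     rank = 1
--     for j, k in enumerate(keys):
--         if k < bk or (k == bk and j < bi):
--             rank += 1
--     return rank
-- ===== Notes on version B (the rewrite author's own statement) =====
-- stated objective: alternative
-- what changed: B replaces A's filter + stable sort + scan by a single filtering pass that tracks the stable-sort-first entry with my id (minimal key, earliest index) plus one counting pass over the collected keys, so no sort is performed.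
import Mathlib
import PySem

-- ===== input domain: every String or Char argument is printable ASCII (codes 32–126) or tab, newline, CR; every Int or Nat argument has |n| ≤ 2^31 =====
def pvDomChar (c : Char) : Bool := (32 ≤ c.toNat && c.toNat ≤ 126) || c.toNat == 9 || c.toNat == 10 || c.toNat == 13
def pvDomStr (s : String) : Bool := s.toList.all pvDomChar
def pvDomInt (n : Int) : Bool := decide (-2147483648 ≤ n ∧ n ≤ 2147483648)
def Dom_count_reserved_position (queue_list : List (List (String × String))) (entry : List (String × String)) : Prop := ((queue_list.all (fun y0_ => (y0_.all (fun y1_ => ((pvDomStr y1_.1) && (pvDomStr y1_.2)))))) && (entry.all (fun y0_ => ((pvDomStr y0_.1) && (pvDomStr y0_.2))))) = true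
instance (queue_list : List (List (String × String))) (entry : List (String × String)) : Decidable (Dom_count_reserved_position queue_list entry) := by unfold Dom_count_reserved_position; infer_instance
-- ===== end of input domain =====

-- B replaces A's filter + stable sort + scan by one filtering pass that tracks the stable-sort-first
-- entry carrying my id plus one counting pass (no sort); return values proved equal.

-- ===== PORT A =====
-- d.get(k)  (dicts are association lists; first match, as in PySem.Dict)
def pvGet (d : List (String × String)) (k : String) : Option String :=
  (PySem.Dict.mk d).get? k

-- d.get(k, dflt)
def pvGetD (d : List (String × String)) (k : String) (dflt : String) : String :=
  (pvGet d k).getD dflt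

def pvTERMINAL : List String := ["COMPLETED", "CANCELLED", "VOID", "EXPIRED"]

-- truthiness of e.get("bqms_number"): absent key (None) and "" are falsy
def pvTruthy (o : Option String) : Bool :=
  match o with
  | none => false
  | some s => !(s == "")

-- e.get("status") not in TERMINAL  (None is not in the tuple)
def pvInTerminal (o : Option String) : Bool :=
  match o with
  | none => false
  | some s => pvTERMINAL.contains s

-- the list-comprehension filter of A
def pvPredA (cat_id : String) (e : List (String × String)) : Bool :=
  pvGet e "category_id" == some cat_id &&
  pvGet e "status" == some "RESERVED" &&
  !pvTruthy (pvGet e "bqms_number") &&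
  !pvInTerminal (pvGet e "status")

-- the 'for idx, e in enumerate(reserved): if e.get("id") == my_id: return idx + 1' loop;
-- total = len(reserved), returned as total + 1 when the loop falls through
def pvRankLoop (my_id : String) (s : List (List (String × String))) (idx : Int) (total : Int) : Int :=
  match s with
  | [] => total + 1
  | e :: rest => if pvGet e "id" == some my_id then idx + 1 else pvRankLoop my_id rest (idx + 1) total

def count_reserved_position (queue_list : List (List (String × String))) (entry : List (String × String)) : Int :=
  let cat_id := pvGetD entry "category_id" ""
  let _my_issued := pvGetD entry "issued_at" "9999"
  let my_id := pvGetD entry "id" ""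
  let reserved := queue_list.filter (pvPredA cat_id)
  let sortedR := PySem.List.sorted reserved (fun e => pvGetD e "issued_at" "9999") false
  pvRankLoop my_id sortedR 0 (sortedR.length : Int)

-- ===== PORT B =====
-- loop body of B's single filtering pass: state = (keys, best)
def pvStepB (cat_id my_id : String) (s : List String × Option (String × Int)) (e : List (String × String)) : List String × Option (String × Int) :=
  if !(pvGet e "category_id" == some cat_id) || !(pvGet e "status" == some "RESERVED") || pvTruthy (pvGet e "bqms_number") then
    s
  else
    let k := pvGetD e "issued_at" "9999"
    let i : Int := (s.1.length : Int)
    let best := if pvGet e "id" == some my_id &&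
                   (match s.2 with | none => true | some b => decide (k < b.1)) then
                  some (k, i)
                else s.2
    (s.1 ++ [k], best)

def count_reserved_position_alt (queue_list : List (List (String × String))) (entry : List (String × String)) : Int :=
  let cat_id := pvGetD entry "category_id" ""
  let my_id := pvGetD entry "id" ""
  let st := queue_list.foldl (pvStepB cat_id my_id) ([], none)
  match st.2 with
  | none => (st.1.length : Int) + 1
  | some (bk, bi) =>
    (PySem.List.enumerate st.1 0).foldl
      (fun rank p => if p.2 < bk || (p.2 == bk && decide (p.1 < bi)) then rank + 1 else rank) 1

-- ===== PRECONDITION & SPEC =====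
def Spec_count_reserved_position (queue_list : List (List (String × String))) (entry : List (String × String)) (out : Int) : Prop := out = count_reserved_position_alt queue_list entry
instance (queue_list : List (List (String × String))) (entry : List (String × String)) (out : Int) : Decidable (Spec_count_reserved_position queue_list entry out) := by unfold Spec_count_reserved_position; infer_instance

-- ===== CLAIM (what is proved, stated in full; the proofs are below) =====
def Claim_equal_count_reserved_position : Prop := ∀ (queue_list : List (List (String × String))) (entry : List (String × String)), Dom_count_reserved_position queue_list entry → Spec_count_reserved_position queue_list entry (count_reserved_position queue_list entry)

-- ===== LEMMAS AND PROOFS =====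

-- abbreviations for the proof: sort key and id-match test
def pvK (e : List (String × String)) : String := pvGetD e "issued_at" "9999"
def pvM (my_id : String) (e : List (String × String)) : Bool := pvGet e "id" == some my_id

-- strict order on (key, index) pairs: "comes earlier in the stable sort"
def pvPLex (c q : String × Int) : Prop := c.1 < q.1 ∨ (c.1 = q.1 ∧ c.2 < q.2)

-- the same order on decorated entries (index, entry)
def pvLex (p q : Int × List (String × String)) : Prop := pvPLex (pvK p.2, p.1) (pvK q.2, q.1)

-- Boolean form of pvLex (B's counting condition)
def pvLexB (p q : Int × List (String × String)) : Bool :=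
  decide (pvK p.2 < pvK q.2) || (pvK p.2 == pvK q.2 && decide (p.1 < q.1))

-- the un-guarded body of B's first loop
def pvReal (my_id : String) (s : List String × Option (String × Int)) (e : List (String × String)) : List String × Option (String × Int) :=
  (s.1 ++ [pvK e],
   if pvM my_id e && (match s.2 with | none => true | some b => decide (pvK e < b.1)) then
     some (pvK e, (s.1.length : Int))
   else s.2)

-- B's running best, abstracted over the filtered list with explicit indices
def pvBestGo (my_id : String) (r : List (List (String × String))) (i : Int) (b : Option (String × Int)) : Option (String × Int) :=
  match r with
  | [] => b
  | e :: t =>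
    pvBestGo my_id t (i + 1)
      (if pvM my_id e && (match b with | none => true | some p => decide (pvK e < p.1)) then some (pvK e, i) else b)

-- the (key, index) pairs of the id-matching entries of r, indexed from i
def pvCands (my_id : String) (r : List (List (String × String))) (i : Int) : List (String × Int) :=
  match r with
  | [] => []
  | e :: t => (if pvM my_id e then [(pvK e, i)] else []) ++ pvCands my_id t (i + 1)

lemma pvLex_iff (p q : Int × List (String × String)) : pvLex p q ↔ pvLexB p q = true := by
  simp [pvLex, pvPLex, pvLexB]

lemma pvPLex_irrefl (c : String × Int) : ¬ pvPLex c c := by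
  unfold pvPLex
  rintro (h | ⟨_, hi⟩)
  · exact lt_irrefl _ h
  · omega

lemma pvPLex_asymm {c q : String × Int} : pvPLex c q → ¬ pvPLex q c := by
  unfold pvPLex
  rintro (h | ⟨hk, hi⟩) (h' | ⟨hk', hi'⟩)
  · exact lt_irrefl _ (h.trans h')
  · rw [hk'] at h; exact lt_irrefl _ h
  · rw [hk] at h'; exact lt_irrefl _ h'
  · omega

-- A's filter predicate coincides with the complement of B's 'continue' guard
lemma predA_eq (cat_id : String) (e : List (String × String)) :
    pvPredA cat_id e =
      !(!(pvGet e "category_id" == some cat_id) || !(pvGet e "status" == some "RESERVED") || pvTruthy (pvGet e "bqms_number")) := by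
  unfold pvPredA
  cases h : pvGet e "status" with
  | none => simp [pvInTerminal]
  | some s =>
    by_cases hs : s = "RESERVED"
    · subst hs; simp [pvInTerminal, pvTERMINAL]
    · simp [hs]

lemma stepB_eq (cat_id my_id : String) (s : List String × Option (String × Int)) (e : List (String × String)) :
    pvStepB cat_id my_id s e = if pvPredA cat_id e then pvReal my_id s e else s := by
  rw [predA_eq]
  cases hg : (!(pvGet e "category_id" == some cat_id) || !(pvGet e "status" == some "RESERVED") || pvTruthy (pvGet e "bqms_number")) <;>
    simp [pvStepB, pvReal, hg, pvK, pvM]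

-- B's fold over the whole queue = fold of the raw body over the filtered list
lemma foldB_filter (cat_id my_id : String) (queue_list : List (List (String × String))) :
    queue_list.foldl (pvStepB cat_id my_id) ([], none) =
      (queue_list.filter (pvPredA cat_id)).foldl (pvReal my_id) ([], none) := by
  have h : pvStepB cat_id my_id = fun s e => if pvPredA cat_id e then pvReal my_id s e else s :=
    funext fun s => funext fun e => stepB_eq cat_id my_id s e
  rw [h, PySem.List.foldl_if_eq_foldl_filter]

lemma foldReal_spec (my_id : String) (r : List (List (String × String))) :
    ∀ (ks : List String) (b : Option (String × Int)),
      r.foldl (pvReal my_id) (ks, b) = (ks ++ r.map pvK, pvBestGo my_id r (ks.length : Int) b) := by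
  induction r with
  | nil => intro ks b; simp [pvBestGo]
  | cons e t ih =>
    intro ks b
    simp only [List.foldl_cons, pvReal, pvBestGo, List.map_cons]
    rw [ih]
    simp

lemma cands_idx (my_id : String) (r : List (List (String × String))) :
    ∀ i, ∀ c ∈ pvCands my_id r i, i ≤ c.2 := by
  induction r with
  | nil => intro i c hc; simp [pvCands] at hc
  | cons e t ih =>
    intro i c hc
    simp only [pvCands, List.mem_append] at hc
    rcases hc with hc | hc
    · split at hc <;> simp_all
    · have := ih (i + 1) c hc; omega

lemma bestGo_spec (my_id : String) (r : List (List (String × String))) :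
    ∀ (i : Int) (b : Option (String × Int)), (∀ p, b = some p → p.2 < i) →
      (pvBestGo my_id r i b = none → (b = none ∧ pvCands my_id r i = [])) ∧
      (∀ q, pvBestGo my_id r i b = some q →
        (b = some q ∨ q ∈ pvCands my_id r i) ∧
        (∀ c ∈ pvCands my_id r i, ¬ pvPLex c q) ∧
        (∀ c, b = some c → ¬ pvPLex c q)) := by
  induction r with
  | nil =>
    intro i b hb
    refine ⟨fun h => ⟨h, rfl⟩, fun q hq => ⟨Or.inl hq, by simp [pvCands], ?_⟩⟩
    intro c hc
    rw [hc] at hq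
    cases Option.some.inj hq
    exact pvPLex_irrefl _
  | cons e t ih =>
    intro i b hb
    simp only [pvBestGo, pvCands]
    cases hM : pvM my_id e with
    | false =>
      simp only [Bool.false_and, if_false, Bool.false_eq_true, List.nil_append]
      have IH := ih (i + 1) b (fun p hp => by have := hb p hp; omega)
      refine ⟨fun h => ⟨(IH.1 h).1, (IH.1 h).2⟩, fun q hq => ?_⟩
      obtain ⟨hmem, hmin, hbmin⟩ := IH.2 q hq
      exact ⟨hmem, hmin, hbmin⟩
    | true =>
      simp only [Bool.true_and]
      cases b with
      | none =>
        simp only [if_pos, List.singleton_append]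
        have IH := ih (i + 1) (some (pvK e, i)) (by rintro p hp; cases Option.some.inj hp; exact lt_add_one i)
        refine ⟨fun h => absurd (IH.1 h).1 (by simp), fun q hq => ?_⟩
        obtain ⟨hmem, hmin, hbmin⟩ := IH.2 q hq
        refine ⟨Or.inr ?_, ?_, ?_⟩
        · rcases hmem with h | h
          · rw [← Option.some.inj h]; exact List.mem_cons_self
          · exact List.mem_cons_of_mem _ h
        · intro c hc
          rcases List.mem_cons.mp hc with rfl | hc
          · exact hbmin _ rfl
          · exact hmin c hc
        · rintro c ⟨⟩
      | some p =>
        have hpi : p.2 < i := hb p rfl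
        by_cases hlt : pvK e < p.1
        · simp only [hlt, decide_true, if_pos, List.singleton_append]
          have IH := ih (i + 1) (some (pvK e, i)) (by rintro q hq; cases Option.some.inj hq; exact lt_add_one i)
          refine ⟨fun h => absurd (IH.1 h).1 (by simp), fun q hq => ?_⟩
          obtain ⟨hmem, hmin, hbmin⟩ := IH.2 q hq
          have hKq : ¬ pvPLex (pvK e, i) q := hbmin _ rfl
          refine ⟨Or.inr ?_, ?_, ?_⟩
          · rcases hmem with h | h
            · rw [← Option.some.inj h]; exact List.mem_cons_self
            · exact List.mem_cons_of_mem _ h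
          · intro c hc
            rcases List.mem_cons.mp hc with rfl | hc
            · exact hKq
            · exact hmin c hc
          · rintro c hc
            cases Option.some.inj hc
            -- ¬ pvPLex p q from q.1 ≤ pvK e < p.1
            have hq1 : q.1 ≤ pvK e := by
              by_contra hcon
              exact hKq (Or.inl (not_le.mp hcon))
            rintro (h | ⟨h, _⟩)
            · exact absurd (lt_trans hlt h) (not_lt.mpr hq1)
            · rw [h] at hlt; exact absurd hlt (not_lt.mpr hq1)
        · simp only [hlt, decide_false, if_neg, Bool.false_eq_true, not_false_eq_true]
          have hple : p.1 ≤ pvK e := not_lt.mp hlt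
          have IH := ih (i + 1) (some p) (by rintro q hq; cases Option.some.inj hq; omega)
          refine ⟨fun h => absurd (IH.1 h).1 (by simp), fun q hq => ?_⟩
          obtain ⟨hmem, hmin, hbmin⟩ := IH.2 q hq
          have hpq : ¬ pvPLex p q := hbmin p rfl
          refine ⟨?_, ?_, ?_⟩
          · rcases hmem with h | h
            · exact Or.inl h
            · exact Or.inr (List.mem_cons_of_mem _ h)
          · intro c hc
            rcases List.mem_cons.mp hc with rfl | hc
            · -- head candidate (pvK e, i)
              rcases hmem with h | h
              · -- q = p
                cases Option.some.inj h
                rintro (h' | ⟨h', hi'⟩)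
                · exact absurd h' (not_lt.mpr hple)
                · omega
              · have hq2 : i + 1 ≤ q.2 := cands_idx my_id t (i + 1) q h
                rintro (h' | ⟨h', hi'⟩)
                · exact hpq (Or.inl (lt_of_le_of_lt hple h'))
                · rcases lt_or_eq_of_le (h' ▸ hple : p.1 ≤ q.1) with hx | hx
                  · exact hpq (Or.inl hx)
                  · exact hpq (Or.inr ⟨hx, by omega⟩)
            · exact hmin c hc
          · rintro c hc
            cases Option.some.inj hc
            exact hpq

-- pvCands is the filtered-and-projected enumeration
lemma cands_eq (my_id : String) (r : List (List (String × String))) :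
    ∀ i, pvCands my_id r i =
      ((PySem.List.enumerate r i).filter (fun p => pvM my_id p.2)).map (fun p => (pvK p.2, p.1)) := by
  induction r with
  | nil => intro i; simp [pvCands, PySem.List.enumerate]
  | cons e t ih =>
    intro i
    rw [PySem.List.enumerate_cons]
    simp only [pvCands, List.filter_cons]
    cases h : pvM my_id e <;> simp [h, ih (i + 1)]

lemma insertBy_map {α β : Type} (f : α → β) (key : β → String) (x : α) (ys : List α) :
    PySem.List.insertBy (fun a b => decide (key a < key b)) (f x) (ys.map f) =
      (PySem.List.insertBy (fun a b => decide (key (f a) < key (f b))) x ys).map f := by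
  induction ys with
  | nil => simp [PySem.List.insertBy]
  | cons y t ih =>
    simp only [List.map_cons, PySem.List.insertBy]
    split <;> simp_all

lemma sorted_map {α β : Type} (f : α → β) (key : β → String) (xs : List α) :
    PySem.List.sorted (xs.map f) key false =
      (PySem.List.sorted xs (fun x => key (f x)) false).map f := by
  rw [PySem.List.sorted_eq_foldl_insertBy, PySem.List.sorted_eq_foldl_insertBy, List.foldl_map]
  induction xs using List.reverseRecOn with
  | nil => simp
  | append_singleton t x ih => rw [List.foldl_append, List.foldl_append]; simp only [List.foldl_cons, List.foldl_nil]; rw [ih, insertBy_map]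

lemma insertBy_pairwise_lex (x : Int × List (String × String)) (ys : List (Int × List (String × String)))
    (hp : ys.Pairwise pvLex) (hidx : ∀ y ∈ ys, y.1 < x.1) :
    (PySem.List.insertBy (fun a b => decide (pvK a.2 < pvK b.2)) x ys).Pairwise pvLex := by
  induction ys with
  | nil => simp [PySem.List.insertBy]
  | cons y t ih =>
    rcases List.pairwise_cons.mp hp with ⟨hyz, ht⟩
    simp only [PySem.List.insertBy]
    split
    · rename_i hxy
      have hxy' : pvK x.2 < pvK y.2 := of_decide_eq_true hxy
      refine List.pairwise_cons.mpr ⟨?_, hp⟩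
      intro z hz
      rcases List.mem_cons.mp hz with rfl | hz
      · exact Or.inl hxy'
      · have hz' := hyz z hz
        unfold pvLex pvPLex at hz' ⊢
        rcases hz' with h | ⟨h, _⟩
        · exact Or.inl (hxy'.trans h)
        · exact Or.inl (h ▸ hxy')
    · rename_i hxy
      have hxy' : ¬ pvK x.2 < pvK y.2 := by simpa using hxy
      refine List.pairwise_cons.mpr ⟨?_, ih ht (fun a ha => hidx a (List.mem_cons_of_mem _ ha))⟩
      intro z hz
      rcases (PySem.List.mem_insertBy _ _ _ _).mp hz with rfl | hz
      · unfold pvLex pvPLex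
        rcases lt_or_eq_of_le (not_lt.mp hxy') with h | h
        · exact Or.inl h
        · exact Or.inr ⟨h, hidx y List.mem_cons_self⟩
      · exact hyz z hz

lemma foldl_insertBy_pairwise (d : List (Int × List (String × String))) :
    ∀ (acc : List (Int × List (String × String))),
      d.Pairwise (fun p q => p.1 < q.1) → acc.Pairwise pvLex → (∀ a ∈ acc, ∀ p ∈ d, a.1 < p.1) →
      (d.foldl (fun acc x => PySem.List.insertBy (fun a b => decide (pvK a.2 < pvK b.2)) x acc) acc).Pairwise pvLex := by
  induction d with
  | nil => intro acc _ h _; simpa using h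
  | cons e t ih =>
    intro acc hd hacc hlt
    simp only [List.foldl_cons]
    rcases List.pairwise_cons.mp hd with ⟨he, ht⟩
    refine ih _ ht ?_ ?_
    · exact insertBy_pairwise_lex e acc hacc (fun a ha => hlt a ha e (by simp))
    · intro a ha p hp
      rcases (PySem.List.mem_insertBy _ _ _ _).mp ha with h | h
      · subst h; exact he p hp
      · exact hlt a h p (by simp [hp])

-- index of the first match in a list whose prefix has no matches
lemma findIdx_append_first {α : Type} (p : α → Bool) (l1 l2 : List α) (y : α)
    (h1 : ∀ x ∈ l1, p x = false) (hy : p y = true) :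
    List.findIdx p (l1 ++ y :: l2) = l1.length := by
  induction l1 with
  | nil => simp [List.findIdx_cons, hy]
  | cons a t ih =>
    simp only [List.cons_append, List.findIdx_cons, h1 a (by simp), cond_false]
    rw [ih (fun x hx => h1 x (by simp [hx]))]
    simp

lemma rankLoop_no_match (my_id : String) (s : List (List (String × String))) :
    ∀ idx total, (∀ e ∈ s, pvM my_id e = false) → pvRankLoop my_id s idx total = total + 1 := by
  induction s with
  | nil => intro idx total _; simp [pvRankLoop]
  | cons e t ih =>
    intro idx total h
    have he := h e (by simp)
    rw [pvM] at he
    simp only [pvRankLoop, he, Bool.false_eq_true, if_false]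
    exact ih _ _ (fun x hx => h x (by simp [hx]))

lemma rankLoop_found (my_id : String) (s : List (List (String × String))) :
    ∀ idx total, (∃ e ∈ s, pvM my_id e = true) →
      pvRankLoop my_id s idx total = idx + (s.findIdx (pvM my_id) : Int) + 1 := by
  induction s with
  | nil => rintro idx total ⟨e, he, _⟩; simp at he
  | cons e t ih =>
    intro idx total hex
    simp only [pvRankLoop, pvM, List.findIdx_cons]
    cases h : pvGet e "id" == some my_id with
    | true => simp [h]
    | false =>
      have hext : ∃ x ∈ t, pvM my_id x = true := by
        rcases hex with ⟨x, hx, hmx⟩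
        rcases List.mem_cons.mp hx with rfl | hx
        · rw [pvM] at hmx; rw [hmx] at h; cases h
        · exact ⟨x, hx, hmx⟩
      simp only [h, cond_false, Bool.false_eq_true, if_false]
      rw [ih _ _ hext]
      push_cast
      ring

lemma enumerate_map {α β : Type} (f : α → β) (xs : List α) :
    ∀ s, PySem.List.enumerate (xs.map f) s = (PySem.List.enumerate xs s).map (fun p => (p.1, f p.2)) := by
  induction xs with
  | nil => intro s; simp [PySem.List.enumerate_nil]
  | cons x t ih => intro s; simp [PySem.List.enumerate_cons, ih (s + 1)]

-- ===== VERDICT (by name: the statement is the Claim_ definition above) =====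
theorem count_reserved_position_spec : Claim_equal_count_reserved_position := by
  intro ql entry _
  unfold Spec_count_reserved_position count_reserved_position count_reserved_position_alt
  simp only []
  rw [foldB_filter, foldReal_spec]
  simp only [List.nil_append, List.length_nil, Nat.cast_zero]
  set cat := pvGetD entry "category_id" "" with hcat
  set mid := pvGetD entry "id" "" with hmid
  set r := ql.filter (pvPredA cat) with hrdef
  have hdec : PySem.List.sorted r (fun e => pvGetD e "issued_at" "9999") false =
      (PySem.List.sorted (PySem.List.enumerate r 0) (fun p => pvK p.2) false).map Prod.snd := by
    conv_lhs => rw [← PySem.List.map_snd_enumerate r 0]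
    exact sorted_map Prod.snd pvK (PySem.List.enumerate r 0)
  set d := PySem.List.enumerate r 0 with hd
  set S := PySem.List.sorted d (fun p => pvK p.2) false with hS
  have hperm : S.Perm d := PySem.List.sorted_perm d (fun p => pvK p.2) false
  have hpw : S.Pairwise pvLex := by
    rw [hS, PySem.List.sorted_eq_foldl_insertBy]
    exact foldl_insertBy_pairwise d [] (PySem.List.pairwise_lt_enumerate r 0) List.Pairwise.nil (by simp)
  have hbest := bestGo_spec mid r 0 none (by rintro p ⟨⟩)
  rw [hdec]
  cases hB : pvBestGo mid r 0 none with
  | none =>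
    simp only []
    obtain ⟨-, hcand⟩ := hbest.1 hB
    rw [cands_eq, ← hd] at hcand
    have hno : ∀ p ∈ d, pvM mid p.2 = false := by
      intro p hp
      by_contra hcon
      have hpT : pvM mid p.2 = true := by revert hcon; cases pvM mid p.2 <;> simp
      have hmemf : p ∈ d.filter (fun p => pvM mid p.2) := List.mem_filter.mpr ⟨hp, hpT⟩
      have : d.filter (fun p => pvM mid p.2) = [] := by
        have := congrArg List.length hcand
        simp only [List.length_map, List.length_nil] at this
        exact List.eq_nil_of_length_eq_zero this
      simp [this] at hmemf
    have hnoS : ∀ e ∈ S.map Prod.snd, pvM mid e = false := by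
      intro e he
      rcases List.mem_map.mp he with ⟨p, hp, rfl⟩
      exact hno p (hperm.mem_iff.mp hp)
    rw [rankLoop_no_match mid _ 0 _ hnoS]
    have hlen : S.length = r.length := by rw [hperm.length_eq, hd, PySem.List.length_enumerate]
    simp [hlen]
  | some q =>
    obtain ⟨hmem, hmin, -⟩ := hbest.2 q hB
    have hqc : q ∈ pvCands mid r 0 := by
      rcases hmem with h | h
      · exact absurd h (by simp)
      · exact h
    rw [cands_eq, ← hd] at hqc
    rcases List.mem_map.mp hqc with ⟨m, hmf, hqm⟩
    rcases List.mem_filter.mp hmf with ⟨hmd, hmM⟩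
    have hminLex : ∀ p ∈ d, pvM mid p.2 = true → ¬ pvLex p m := by
      intro p hp hpM hlex
      have hpc : (pvK p.2, p.1) ∈ pvCands mid r 0 := by
        rw [cands_eq, ← hd]
        exact List.mem_map.mpr ⟨p, List.mem_filter.mpr ⟨hp, hpM⟩, rfl⟩
      unfold pvLex at hlex
      rw [hqm] at hlex
      exact hmin _ hpc hlex
    obtain ⟨bk, bi⟩ := q
    cases hqm
    -- A-side: first match in the sorted list
    have hmS : m ∈ S := hperm.mem_iff.mpr hmd
    obtain ⟨pre, suf, hSsplit⟩ := List.append_of_mem hmS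
    have hpw' : (pre ++ m :: suf).Pairwise pvLex := hSsplit ▸ hpw
    obtain ⟨hpre, hconspw, hcross⟩ := List.pairwise_append.mp hpw'
    have hmsuf : ∀ b ∈ suf, pvLex m b := (List.pairwise_cons.mp hconspw).1
    have hpreNo : ∀ a ∈ pre, pvM mid a.2 = false := by
      intro a ha
      by_contra hcon
      have haT : pvM mid a.2 = true := by revert hcon; cases pvM mid a.2 <;> simp
      have had : a ∈ d := hperm.mem_iff.mp (hSsplit ▸ (by simp [ha] : a ∈ pre ++ m :: suf))
      exact hminLex a had haT (hcross a ha m (by simp))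
    have hfind : List.findIdx (fun p => pvM mid p.2) S = pre.length := by
      rw [hSsplit]
      exact findIdx_append_first _ pre suf m hpreNo hmM
    have hcount : S.countP (fun p => pvLexB p m) = pre.length := by
      rw [hSsplit, List.countP_append, List.countP_cons]
      have h1 : pre.countP (fun p => pvLexB p m) = pre.length :=
        List.countP_eq_length.mpr (fun a ha => (pvLex_iff a m).mp (hcross a ha m (by simp)))
      have h2 : suf.countP (fun p => pvLexB p m) = 0 :=
        List.countP_eq_zero.mpr (fun b hb hcon =>
          pvPLex_asymm (hmsuf b hb) ((pvLex_iff b m).mpr hcon))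
      have h3 : pvLexB m m = false := by
        rw [Bool.eq_false_iff]
        intro hcon
        exact pvPLex_irrefl _ ((pvLex_iff m m).mpr hcon)
      rw [h1, h2, h3]
      simp
    have hex : ∃ e ∈ S.map Prod.snd, pvM mid e = true :=
      ⟨m.2, List.mem_map.mpr ⟨m, hmS, rfl⟩, hmM⟩
    rw [rankLoop_found mid _ 0 _ hex, List.findIdx_map]
    -- B-side: rewrite the counting fold
    rw [enumerate_map pvK r 0, ← hd]
    simp only []
    rw [List.foldl_map]
    have hfold : d.foldl (fun (rank : Int) p =>
        if (decide (pvK p.2 < pvK m.2) || (pvK p.2 == pvK m.2 && decide (p.1 < m.1))) then rank + 1 else rank) 1 =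
        1 + (d.countP (fun p => pvLexB p m) : Int) := by
      have hcongr : d.foldl (fun (rank : Int) p =>
          if (decide (pvK p.2 < pvK m.2) || (pvK p.2 == pvK m.2 && decide (p.1 < m.1))) then rank + 1 else rank) 1 =
          d.foldl (fun (rank : Int) p => if pvLexB p m then rank + 1 else rank) 1 := rfl
      rw [hcongr, PySem.List.foldl_if_add_one (fun p => pvLexB p m) d 1]
    rw [hfold, ← hperm.countP_eq, hcount]
    have hcomp : List.findIdx ((pvM mid) ∘ Prod.snd) S = List.findIdx (fun p => pvM mid p.2) S := rfl
    rw [hcomp, hfind]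
    ring
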